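-- pv_equiv track=rewrite | github.com/stuartstein777/CodeWars | 7KYU/Right in the Centre/solution.py | is_in_middle
-- ===== SOURCE A (Python) =====
-- def is_in_middle(sequence):
--     abcIdxs = [i for i in range(len(sequence)) if sequence.startswith('abc', i)]
--     for idx in abcIdxs:
--         l = len(sequence[0:idx])
--         r = len(sequence[(idx+3)::])
--         if abs(l - r) <= 1:
--             return True
--     return False
-- ===== SOURCE B (Python) =====
-- def is_in_middle(sequence):
--     # 'abc' at index idx is centered iff abs(idx - (len-idx-3)) <= 1, i.e.
--     # 2*idx is within 1 of len-3; only one (odd len) or two (even len)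
--     # indices can satisfy that, so check just those positions.
--     n = len(sequence)
--     if n % 2 == 1:
--         candidates = [(n - 3) // 2]
--     else:
--         candidates = [(n - 4) // 2, (n - 2) // 2]
--     return any(i >= 0 and sequence.startswith('abc', i) for i in candidates)
-- ===== Notes on version B (the rewrite author's own statement) =====
-- stated objective: faster
-- what changed: Instead of scanning the whole string for every 'abc' occurrence and testing the balance condition on each, B solves the balance inequality |2*idx-(n-3)|<=1 in closed form and tests startswith at the at-most-two admissible center indices.
import Mathlib
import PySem

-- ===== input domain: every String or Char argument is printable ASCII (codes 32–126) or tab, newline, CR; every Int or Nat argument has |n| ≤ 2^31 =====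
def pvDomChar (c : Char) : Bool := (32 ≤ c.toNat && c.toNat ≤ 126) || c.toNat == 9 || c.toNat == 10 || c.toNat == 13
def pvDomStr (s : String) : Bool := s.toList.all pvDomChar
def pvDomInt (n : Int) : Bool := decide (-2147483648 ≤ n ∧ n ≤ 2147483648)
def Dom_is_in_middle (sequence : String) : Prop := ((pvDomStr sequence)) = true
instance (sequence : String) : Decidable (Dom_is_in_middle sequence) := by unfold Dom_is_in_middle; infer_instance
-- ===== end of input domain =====

-- B replaces A's full scan for 'abc' occurrences by a closed-form solution of the
-- balance condition, testing only the at-most-two admissible center indices (faster).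

-- ===== PORT A =====
-- Python's s.startswith('abc', i) equals s[i:].startswith('abc') (start clamped like a slice bound) — exact.
def isInMiddleSw (sequence : String) (i : Int) : Bool :=
  PySem.Str.startswith (PySem.Str.slice sequence (some i) none) "abc"

-- the early-return for loop over abcIdxs
def isInMiddleLoop (sequence : String) : List Int → Bool
  | [] => false
  | idx :: rest =>
      let l : Int := PySem.Str.len (PySem.Str.slice sequence (some 0) (some idx))
      let r : Int := PySem.Str.len (PySem.Str.slice sequence (some (idx + 3)) none)
      if |l - r| ≤ 1 then true else isInMiddleLoop sequence rest

def is_in_middle (sequence : String) : Bool :=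
  let abcIdxs := (PySem.List.pyRange 0 (PySem.Str.len sequence) 1).filter
      (fun i => isInMiddleSw sequence i)
  isInMiddleLoop sequence abcIdxs

-- ===== PORT B =====
def is_in_middle_alt (sequence : String) : Bool :=
  let n : Int := PySem.Str.len sequence
  let candidates : List Int :=
    if PySem.Int.mod n 2 = 1 then [PySem.Int.floordiv (n - 3) 2]
    else [PySem.Int.floordiv (n - 4) 2, PySem.Int.floordiv (n - 2) 2]
  candidates.any (fun i => decide (0 ≤ i) && isInMiddleSw sequence i)

-- ===== PRECONDITION & SPEC =====
def Spec_is_in_middle (sequence : String) (out : Bool) : Prop := out = is_in_middle_alt sequence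
instance (sequence : String) (out : Bool) : Decidable (Spec_is_in_middle sequence out) := by unfold Spec_is_in_middle; infer_instance

-- ===== CLAIM (what is proved, stated in full; the proofs are below) =====
def Claim_equal_is_in_middle : Prop := ∀ (sequence : String), Dom_is_in_middle sequence → Spec_is_in_middle sequence (is_in_middle sequence)

-- ===== LEMMAS AND PROOFS =====

theorem sw_iff (s : String) (i : Int) (hi : 0 ≤ i) :
    isInMiddleSw s i = true ↔ "abc".toList <+: s.toList.drop i.toNat := by
  unfold isInMiddleSw
  rw [PySem.Str.startswith_eq, PySem.Chars.startswith_iff, PySem.Str.toList_slice,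
    PySem.Chars.slice_eq_listSlice, PySem.List.slice_from _ hi]

theorem sw_bound (s : String) (i : Int) (hi : 0 ≤ i)
    (h : isInMiddleSw s i = true) : i.toNat + 3 ≤ s.toList.length := by
  have h1 := ((sw_iff s i hi).1 h).length_le
  simp only [List.length_drop] at h1
  have h2 : ("abc".toList).length = 3 := by decide
  omega

theorem loop_eq_any (s : String) (xs : List Int) :
    isInMiddleLoop s xs = xs.any (fun idx =>
      decide (|PySem.Str.len (PySem.Str.slice s (some 0) (some idx)) -
        PySem.Str.len (PySem.Str.slice s (some (idx + 3)) none)| ≤ 1)) := by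
  induction xs with
  | nil => rfl
  | cons idx rest ih =>
      rw [List.any_cons, ← ih]
      show (if _ then _ else _) = _
      split_ifs with h
      · rw [decide_eq_true h, Bool.true_or]
      · rw [decide_eq_false h, Bool.false_or]

theorem balance_iff (s : String) (i : Int) (h0 : 0 ≤ i) (hb : i.toNat + 3 ≤ s.toList.length) :
    (|PySem.Str.len (PySem.Str.slice s (some 0) (some i)) -
      PySem.Str.len (PySem.Str.slice s (some (i + 3)) none)| ≤ 1) ↔
    |2 * i - ((s.toList.length : Int) - 3)| ≤ 1 := by
  rw [PySem.Str.len_eq, PySem.Str.len_eq, PySem.Str.toList_slice, PySem.Str.toList_slice,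
    PySem.Chars.slice_eq_listSlice, PySem.Chars.slice_eq_listSlice,
    PySem.List.slice_toNat _ (by norm_num) h0, PySem.List.slice_from _ (by omega)]
  simp only [List.length_take, List.length_drop]
  rw [abs_le, abs_le]
  omega

theorem a_iff (s : String) :
    is_in_middle s = true ↔ ∃ i : Int, 0 ≤ i ∧ isInMiddleSw s i = true ∧
      |2 * i - ((s.toList.length : Int) - 3)| ≤ 1 := by
  unfold is_in_middle
  rw [loop_eq_any]
  simp only [List.any_eq_true, List.mem_filter, PySem.List.mem_pyRange_one, decide_eq_true_eq,
    PySem.Str.len_eq]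
  constructor
  · rintro ⟨i, ⟨⟨h0, hlt⟩, hsw⟩, hbal⟩
    exact ⟨i, h0, hsw, (balance_iff s i h0 (sw_bound s i h0 hsw)).1 hbal⟩
  · rintro ⟨i, h0, hsw, hbal⟩
    have hb := sw_bound s i h0 hsw
    exact ⟨i, ⟨⟨h0, by omega⟩, hsw⟩, (balance_iff s i h0 hb).2 hbal⟩

theorem b_iff (s : String) :
    is_in_middle_alt s = true ↔ ∃ i : Int, 0 ≤ i ∧ isInMiddleSw s i = true ∧
      |2 * i - ((s.toList.length : Int) - 3)| ≤ 1 := by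
  unfold is_in_middle_alt
  simp only [PySem.Str.len_eq]
  set N : Int := (s.toList.length : Int) with hN
  have hN0 : 0 ≤ N := by positivity
  rw [PySem.Int.mod_eq_emod_of_pos (by norm_num),
    PySem.Int.floordiv_eq_ediv_of_pos (a := N - 3) (by norm_num),
    PySem.Int.floordiv_eq_ediv_of_pos (a := N - 4) (by norm_num),
    PySem.Int.floordiv_eq_ediv_of_pos (a := N - 2) (by norm_num)]
  split_ifs with hpar
  · simp only [List.any_cons, List.any_nil, Bool.or_false, Bool.and_eq_true,
      decide_eq_true_eq]
    constructor
    · rintro ⟨h0, hsw⟩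
      exact ⟨(N - 3) / 2, h0, hsw, by rw [abs_le]; omega⟩
    · rintro ⟨i, h0, hsw, hbal⟩
      rw [abs_le] at hbal
      have : i = (N - 3) / 2 := by omega
      subst this
      exact ⟨h0, hsw⟩
  · simp only [List.any_cons, List.any_nil, Bool.or_false, Bool.or_eq_true, Bool.and_eq_true,
      decide_eq_true_eq]
    constructor
    · rintro (⟨h0, hsw⟩ | ⟨h0, hsw⟩)
      · exact ⟨(N - 4) / 2, h0, hsw, by rw [abs_le]; omega⟩
      · exact ⟨(N - 2) / 2, h0, hsw, by rw [abs_le]; omega⟩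
    · rintro ⟨i, h0, hsw, hbal⟩
      rw [abs_le] at hbal
      have h : i = (N - 4) / 2 ∨ i = (N - 2) / 2 := by omega
      rcases h with h | h <;> subst h
      · exact Or.inl ⟨h0, hsw⟩
      · exact Or.inr ⟨h0, hsw⟩

-- ===== VERDICT (by name: the statement is the Claim_ definition above) =====
theorem is_in_middle_spec : Claim_equal_is_in_middle := by
  intro s _
  unfold Spec_is_in_middle
  exact Bool.coe_iff_coe.mp ((a_iff s).trans (b_iff s).symm)
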